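-- pv_equiv track=rewrite | github.com/andkhalov/crossfi-video-generator | python/video_generator.py | _inject_news_location
-- ===== SOURCE A (Python) =====
-- from typing import List, Dict, Any, Optional
--
-- def _inject_news_location(original_prompt: str, segment_info: Dict[str, str],
--                         segment_num: int, total_segments: int) -> str:
--     """Инжекция локации для новостного сегмента"""
--     lines = original_prompt.split('\n')
--     new_lines = []
--
--     for line in lines:
--         if line.startswith("Frame:"):
--             new_lines.append(f"Frame: News segment {segment_num}/{total_segments} - {segment_info['location']}")
--         elif line.startswith("Character:"):
--             if segment_num == 1:
--                 new_lines.append("Character: Professional news anchor in navy suit behind studio desk")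
--             elif segment_num == 2:
--                 new_lines.append("Character: Field reporter with microphone in business casual attire")
--             else:
--                 new_lines.append("Character: Expert analyst or citizen being interviewed")
--         elif line.startswith("Location:"):
--             new_lines.append(f"Location: {segment_info['location']}")
--         else:
--             new_lines.append(line)
--
--     return '\n'.join(new_lines)
-- ===== SOURCE B (Python) =====
-- def _inject_news_location(original_prompt: str, segment_info, segment_num: int, total_segments: int) -> str:
--     """Table-driven line fixing over a recursive partition of the prompt (no split/join)."""
--     character = {
--         1: "Character: Professional news anchor in navy suit behind studio desk",
--         2: "Character: Field reporter with microphone in business casual attire",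
--     }.get(segment_num, "Character: Expert analyst or citizen being interviewed")
--     table = [
--         ("Frame:", lambda: f"Frame: News segment {segment_num}/{total_segments} - {segment_info['location']}"),
--         ("Character:", lambda: character),
--         ("Location:", lambda: f"Location: {segment_info['location']}"),
--     ]
--
--     def fix(line):
--         for prefix, make in table:
--             if line.startswith(prefix):
--                 return make()
--         return line
--
--     def go(text):
--         head, sep, tail = text.partition('\n')
--         return fix(head) if not sep else fix(head) + '\n' + go(tail)
--
--     return go(original_prompt)
-- ===== Notes on version B (the rewrite author's own statement) =====
-- stated objective: alternative
-- what changed: Replaces split('\n')+if/elif-chain loop+join with a recursive partition('\n') traversal of the string and a table-driven (prefix, replacement-thunk) dispatch, picking the Character line once from a dict keyed by segment_num.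
import Mathlib
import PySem

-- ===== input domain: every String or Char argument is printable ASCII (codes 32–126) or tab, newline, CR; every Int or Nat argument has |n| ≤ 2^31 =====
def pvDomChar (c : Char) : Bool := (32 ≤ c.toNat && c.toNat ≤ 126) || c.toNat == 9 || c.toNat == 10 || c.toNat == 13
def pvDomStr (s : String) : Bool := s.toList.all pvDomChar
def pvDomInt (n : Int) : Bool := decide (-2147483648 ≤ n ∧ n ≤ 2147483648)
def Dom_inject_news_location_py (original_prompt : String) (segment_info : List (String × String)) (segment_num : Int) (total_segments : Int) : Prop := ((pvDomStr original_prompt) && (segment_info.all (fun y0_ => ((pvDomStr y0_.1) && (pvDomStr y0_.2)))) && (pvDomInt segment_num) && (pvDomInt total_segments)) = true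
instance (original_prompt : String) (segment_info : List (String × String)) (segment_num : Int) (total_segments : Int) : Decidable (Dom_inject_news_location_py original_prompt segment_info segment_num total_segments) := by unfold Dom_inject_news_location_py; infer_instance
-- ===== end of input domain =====

-- B replaces A's split/if-elif-loop/join with a recursive partition('\n') traversal and a
-- table-driven prefix dispatch (alternative decomposition, same cost). Equivalence of return values.

-- ===== PORT A =====
-- A, transliterated at the List Char level (PySem.Chars are the definitions; String via toList/mk).
-- segment_info['location'] raises KeyError when the key is absent and a Frame:/Location: line exists;
-- those inputs are excluded by Pre_, so Dict.getD with default "" is exact inside Pre_.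
def inject_news_location_py (original_prompt : String) (segment_info : List (String × String)) (segment_num : Int) (total_segments : Int) : String :=
  let loc : List Char := (PySem.Dict.getD (PySem.Dict.ofList segment_info) "location" "").toList
  let lines := PySem.Chars.splitOn original_prompt.toList ['\n']
  let newLines := lines.foldl (fun acc line =>
    if PySem.Chars.startswith line "Frame:".toList then
      acc ++ ["Frame: News segment ".toList ++ PySem.Int.toChars segment_num ++ "/".toList ++ PySem.Int.toChars total_segments ++ " - ".toList ++ loc]
    else if PySem.Chars.startswith line "Character:".toList then
      (if segment_num = 1 then
        acc ++ ["Character: Professional news anchor in navy suit behind studio desk".toList]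
      else if segment_num = 2 then
        acc ++ ["Character: Field reporter with microphone in business casual attire".toList]
      else
        acc ++ ["Character: Expert analyst or citizen being interviewed".toList])
    else if PySem.Chars.startswith line "Location:".toList then
      acc ++ ["Location: ".toList ++ loc]
    else
      acc ++ [line]) []
  String.mk (PySem.Chars.join ['\n'] newLines)

-- ===== PORT B =====
-- character = {1: anchor, 2: reporter}.get(segment_num, analyst)
def pvCharacterLine (segment_num : Int) : List Char :=
  PySem.Dict.getD (PySem.Dict.ofList
    [((1 : Int), "Character: Professional news anchor in navy suit behind studio desk".toList),
     ((2 : Int), "Character: Field reporter with microphone in business casual attire".toList)])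
    segment_num "Character: Expert analyst or citizen being interviewed".toList

-- B's table of (prefix, replacement thunk); thunks are lazy like B's lambdas (getD "" exact inside Pre_)
def pvTable (segment_info : List (String × String)) (segment_num : Int) (total_segments : Int) : List (List Char × (Unit → List Char)) :=
  let loc : Unit → List Char := fun _ => (PySem.Dict.getD (PySem.Dict.ofList segment_info) "location" "").toList
  [("Frame:".toList, fun _ => "Frame: News segment ".toList ++ PySem.Int.toChars segment_num ++ "/".toList ++ PySem.Int.toChars total_segments ++ " - ".toList ++ loc ()),
   ("Character:".toList, fun _ => pvCharacterLine segment_num),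
   ("Location:".toList, fun _ => "Location: ".toList ++ loc ())]

-- B's fix(line): first matching prefix in the table wins, else the line unchanged
def pvFix (table : List (List Char × (Unit → List Char))) (line : List Char) : List Char :=
  match table.find? (fun pr => PySem.Chars.startswith line pr.1) with
  | some pr => pr.2 ()
  | none => line

-- B's go(text): head, sep, tail = text.partition('\n'); hand port (PySem has no partition):
-- head = takeWhile (≠ '\n'), sep nonempty iff dropWhile (≠ '\n') nonempty, tail = its tail — exact for the 1-char separator
def pvGo (fix : List Char → List Char) (text : List Char) : List Char :=
  match h : text.dropWhile (fun c => !(c == '\n')) with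
  | [] => fix (text.takeWhile (fun c => !(c == '\n')))
  | _ :: tail => fix (text.takeWhile (fun c => !(c == '\n'))) ++ '\n' :: pvGo fix tail
termination_by text.length
decreasing_by
  have h2 := List.length_dropWhile_le (fun c => !(c == '\n')) text
  rw [h] at h2
  simp at h2
  omega

def inject_news_location_py_alt (original_prompt : String) (segment_info : List (String × String)) (segment_num : Int) (total_segments : Int) : String :=
  String.mk (pvGo (pvFix (pvTable segment_info segment_num total_segments)) original_prompt.toList)

-- ===== PRECONDITION & SPEC =====
-- Pre_ excludes exactly the inputs where A raises KeyError: 'location' absent from segment_info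
-- while some line of the prompt starts with "Frame:" or "Location:".
def Pre_inject_news_location_py (original_prompt : String) (segment_info : List (String × String)) (segment_num : Int) (total_segments : Int) : Prop :=
  (PySem.Dict.contains (PySem.Dict.ofList segment_info) "location"
    || (PySem.Chars.splitOn original_prompt.toList ['\n']).all
         (fun l => !(PySem.Chars.startswith l "Frame:".toList || PySem.Chars.startswith l "Location:".toList))) = true
instance (original_prompt : String) (segment_info : List (String × String)) (segment_num : Int) (total_segments : Int) : Decidable (Pre_inject_news_location_py original_prompt segment_info segment_num total_segments) := by unfold Pre_inject_news_location_py; infer_instance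

def pvWitness_inject_news_location_py : String × (List (String × String)) × Int × Int :=
  ("Frame: x\nCharacter: y\nLocation: z\nAction: jump", [("location", "CrossFi Arena")], 1, 3)

def Spec_inject_news_location_py (original_prompt : String) (segment_info : List (String × String)) (segment_num : Int) (total_segments : Int) (out : String) : Prop := out = inject_news_location_py_alt original_prompt segment_info segment_num total_segments
instance (original_prompt : String) (segment_info : List (String × String)) (segment_num : Int) (total_segments : Int) (out : String) : Decidable (Spec_inject_news_location_py original_prompt segment_info segment_num total_segments out) := by unfold Spec_inject_news_location_py; infer_instance

-- ===== CLAIM (what is proved, stated in full; the proofs are below) =====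
def Claim_equal_inject_news_location_py : Prop := ∀ (original_prompt : String) (segment_info : List (String × String)) (segment_num : Int) (total_segments : Int), Dom_inject_news_location_py original_prompt segment_info segment_num total_segments → Pre_inject_news_location_py original_prompt segment_info segment_num total_segments → Spec_inject_news_location_py original_prompt segment_info segment_num total_segments (inject_news_location_py original_prompt segment_info segment_num total_segments)

-- ===== LEMMAS AND PROOFS =====

-- reference splitter: split on '\n', structurally
def pvSplitNL : List Char → List (List Char)
  | [] => [[]]
  | c :: rest =>
    if c = '\n' then [] :: pvSplitNL rest
    else match pvSplitNL rest with
      | [] => [[c]]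
      | h :: t => (c :: h) :: t

lemma pvSplitNL_ne_nil (l : List Char) : pvSplitNL l ≠ [] := by
  cases l with
  | nil => simp [pvSplitNL]
  | cons c rest =>
    simp only [pvSplitNL]
    split
    · simp
    · split <;> simp

lemma pvGo_spec (fuel : Nat) (l cur : List Char) (acc : List (List Char)) (h : l.length < fuel) :
    PySem.Chars.splitOn.go ['\n'] fuel l cur acc
      = acc.reverse ++ (pvSplitNL l).modifyHead (cur.reverse ++ ·) := by
  induction fuel generalizing l cur acc with
  | zero => omega
  | succ f ih =>
    cases l with
    | nil =>
      simp [PySem.Chars.splitOn.go, pvSplitNL]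
    | cons c rest =>
      by_cases hc : c = '\n'
      · subst hc
        rw [PySem.Chars.splitOn.go]
        simp only [List.isPrefixOf, beq_self_eq_true, Bool.true_and, if_true, List.length_cons,
          List.length_nil, Nat.zero_add, List.drop_succ_cons, List.drop_zero]
        rw [ih rest [] (cur.reverse :: acc) (by simpa using Nat.lt_of_succ_lt_succ h)]
        simp only [pvSplitNL, List.reverse_cons, List.reverse_nil, List.nil_append, List.append_assoc,
          List.modifyHead, List.singleton_append]
        cases pvSplitNL rest <;> simp
      · rw [PySem.Chars.splitOn.go]
        have : (['\n'].isPrefixOf (c :: rest)) = false := by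
          simp [List.isPrefixOf]
          exact fun hh => (hc hh.symm).elim
        rw [this]
        simp only [Bool.false_eq_true, if_false]
        rw [ih rest (c :: cur) acc (by simpa using Nat.lt_of_succ_lt_succ h)]
        simp only [pvSplitNL, if_neg hc]
        cases hs : pvSplitNL rest with
        | nil => exact absurd hs (pvSplitNL_ne_nil rest)
        | cons hh tt => simp [List.modifyHead]

lemma pvSplitOn_eq (l : List Char) : PySem.Chars.splitOn l ['\n'] = pvSplitNL l := by
  rw [PySem.Chars.splitOn, pvGo_spec (l.length + 1) l [] [] (by omega)]
  cases hs : pvSplitNL l with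
  | nil => exact absurd hs (pvSplitNL_ne_nil l)
  | cons h t => simp [List.modifyHead]

lemma pvSplitNL_eq_partition (l : List Char) :
    pvSplitNL l = (match l.dropWhile (fun c => !(c == '\n')) with
      | [] => [l]
      | _ :: tail => l.takeWhile (fun c => !(c == '\n')) :: pvSplitNL tail) := by
  induction l with
  | nil => simp [pvSplitNL]
  | cons c rest ih =>
    by_cases hc : c = '\n'
    · subst hc
      simp [pvSplitNL, List.dropWhile, List.takeWhile]
    · have hb : (!(c == '\n')) = true := by simp [hc]
      simp only [pvSplitNL, if_neg hc, List.dropWhile_cons, hb, if_true, List.takeWhile_cons, ih]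
      cases hd : rest.dropWhile (fun c => !(c == '\n')) with
      | nil => simp
      | cons x tail =>
        cases hs : pvSplitNL tail with
        | nil => exact absurd hs (pvSplitNL_ne_nil tail)
        | cons hh tt => simp

lemma pvGo_of_nil (fix : List Char → List Char) (text : List Char)
    (hd : text.dropWhile (fun c => !(c == '\n')) = []) :
    pvGo fix text = fix (text.takeWhile (fun c => !(c == '\n'))) := by
  rw [pvGo]
  split
  · rfl
  · rename_i heq; rw [hd] at heq; cases heq

lemma pvGo_of_cons (fix : List Char → List Char) (text : List Char) (x : Char) (tail : List Char)
    (hd : text.dropWhile (fun c => !(c == '\n')) = x :: tail) :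
    pvGo fix text = fix (text.takeWhile (fun c => !(c == '\n'))) ++ '\n' :: pvGo fix tail := by
  rw [pvGo]
  split
  · rename_i heq; rw [hd] at heq; cases heq
  · rename_i heq
    rw [hd] at heq
    cases heq
    rfl

lemma pvGo_eq_join (fix : List Char → List Char) (text : List Char) :
    pvGo fix text = PySem.Chars.join ['\n'] ((pvSplitNL text).map fix) := by
  rw [pvSplitNL_eq_partition]
  cases hd : text.dropWhile (fun c => !(c == '\n')) with
  | nil =>
    have ht : text.takeWhile (fun c => !(c == '\n')) = text := by
      have := List.takeWhile_append_dropWhile (p := fun c => !(c == '\n')) (l := text)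
      rw [hd, List.append_nil] at this
      exact this
    rw [pvGo_of_nil fix text hd, ht]
    simp [PySem.Chars.join, List.intercalate]
  | cons x tail =>
    rw [pvGo_of_cons fix text x tail hd]
    cases hs : pvSplitNL tail with
    | nil => exact absurd hs (pvSplitNL_ne_nil tail)
    | cons hh tt =>
      rw [pvGo_eq_join fix tail, hs]
      simp [PySem.Chars.join_cons_cons, hs]
termination_by text.length
decreasing_by
  have h2 := List.length_dropWhile_le (fun c => !(c == '\n')) text
  rw [hd] at h2
  simp at h2
  omega

lemma pvCharacterLine_eq (sn : Int) :
    pvCharacterLine sn =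
      (if sn = 1 then "Character: Professional news anchor in navy suit behind studio desk".toList
       else if sn = 2 then "Character: Field reporter with microphone in business casual attire".toList
       else "Character: Expert analyst or citizen being interviewed".toList) := by
  by_cases h1 : sn = 1
  · subst h1; rfl
  · by_cases h2 : sn = 2
    · subst h2; rfl
    · have b1 : ((1 : Int) == sn) = false := by simp [Ne.symm h1]
      have b2 : ((2 : Int) == sn) = false := by simp [Ne.symm h2]
      have hitems : ∀ (a b : List Char),
          (PySem.Dict.ofList [((1 : Int), a), ((2 : Int), b)]).items = [((1 : Int), a), ((2 : Int), b)] :=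
        fun a b => rfl
      simp only [if_neg h1, if_neg h2, pvCharacterLine, PySem.Dict.getD, PySem.Dict.get?, hitems]
      simp [List.find?, b1, b2]

-- ===== VERDICT (by name: the statement is the Claim_ definition above) =====
theorem inject_news_location_py_spec : Claim_equal_inject_news_location_py := by
  intro op si sn ts _dom _pre
  unfold Spec_inject_news_location_py
  simp only [inject_news_location_py, inject_news_location_py_alt]
  rw [pvSplitOn_eq, pvGo_eq_join]
  have hfun : (fun (acc : List (List Char)) line =>
      if PySem.Chars.startswith line "Frame:".toList then
        acc ++ ["Frame: News segment ".toList ++ PySem.Int.toChars sn ++ "/".toList ++ PySem.Int.toChars ts ++ " - ".toList ++ (PySem.Dict.getD (PySem.Dict.ofList si) "location" "").toList]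
      else if PySem.Chars.startswith line "Character:".toList then
        (if sn = 1 then
          acc ++ ["Character: Professional news anchor in navy suit behind studio desk".toList]
        else if sn = 2 then
          acc ++ ["Character: Field reporter with microphone in business casual attire".toList]
        else
          acc ++ ["Character: Expert analyst or citizen being interviewed".toList])
      else if PySem.Chars.startswith line "Location:".toList then
        acc ++ ["Location: ".toList ++ (PySem.Dict.getD (PySem.Dict.ofList si) "location" "").toList]
      else
        acc ++ [line])
      = fun acc line => acc ++ [pvFix (pvTable si sn ts) line] := by
    funext acc line
    by_cases hF : PySem.Chars.startswith line "Frame:".toList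
    · simp only [pvFix, pvTable, List.find?, hF, if_true]
    · by_cases hC : PySem.Chars.startswith line "Character:".toList
      · simp only [pvFix, pvTable, List.find?, hF, hC, Bool.false_eq_true, if_false, if_true,
          pvCharacterLine_eq sn]
        split_ifs <;> rfl
      · by_cases hL : PySem.Chars.startswith line "Location:".toList
        · simp only [pvFix, pvTable, List.find?, hF, hC, hL, Bool.false_eq_true, if_false, if_true]
        · simp only [pvFix, pvTable, List.find?, hF, hC, hL, Bool.false_eq_true, if_false]
  rw [hfun, PySem.List.foldl_append_singleton_eq_map]
  simp
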